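-- pv_equiv track=rewrite | github.com/calvinp0/BiTSplitter | src/connect_recon_to_origin.py | get_custom_adjlist
-- ===== SOURCE A (Python) =====
-- from typing import Dict, List, Tuple
--
-- def get_custom_adjlist(
--     adjlist: Dict[int, List[int]],
--     symbols: Tuple[str, ...],
--     heavy_atoms_only: bool = True,
-- ) -> Dict[int, List[List[int]]]:
--     """
--     Create a custom adjacency list for heavy atoms with nested paths.
--
--     Args:
--         adjlist (Dict[int, List[int]]): The input adjacency list.
--         symbols (Tuple[str]): The chemical symbols of the atoms.
--         heavy_atoms_only (bool): Whether to include only heavy atoms.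
--
--     Returns:
--         Dict[int, List[List[int]]]: A custom adjacency list with nested paths.
--     """
--     def is_heavy(atom: int) -> bool:
--         """Check if an atom is a heavy atom (non-hydrogen)."""
--         return symbols[atom] != "H"
--
--     def traverse_path(start_atom: int, current_atom: int, visited: set) -> List[int]:
--         """
--         Recursively traverse paths from the current atom.
--
--         Args:
--             start_atom (int): The original atom where the path started.
--             current_atom (int): The atom currently being traversed.
--             visited (set): The set of atoms already visited in this traversal.
--
--         Returns:
--             List[int]: The traversed path.
--         """
--         path = [current_atom]
--         visited.add(current_atom)
--         for neighbor in adjlist[current_atom]: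
--             if neighbor == start_atom or neighbor in visited:
--                 continue
--             if is_heavy(neighbor):
--                 path.extend(traverse_path(start_atom, neighbor, visited))
--         return path
--
--     custom_adjlist = {}
--     for atom, neighbors in adjlist.items():
--         if heavy_atoms_only and not is_heavy(atom):
--             continue
--
--         # Initialize paths for this heavy atom
--         custom_adjlist[atom] = []
--         visited_neighbors = set()
--         for neighbor in neighbors:
--             if is_heavy(neighbor) and neighbor not in visited_neighbors:
--                 # Traverse paths starting with this heavy neighbor
--                 path = traverse_path(atom, neighbor, visited_neighbors)
--                 custom_adjlist[atom].append(path)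
--
--     return custom_adjlist
-- ===== SOURCE B (Python) =====
-- def get_custom_adjlist(adjlist, symbols, heavy_atoms_only=True):
--     """Iterative re-implementation: explicit-stack DFS instead of recursion."""
--     def is_heavy(atom):
--         return symbols[atom] != "H"
--
--     def paths_from(atom, neighbors):
--         paths = []
--         visited = set()
--         for nb in neighbors:
--             if is_heavy(nb) and nb not in visited:
--                 visited.add(nb)
--                 path = [nb]
--                 stack = list(reversed(adjlist[nb]))
--                 while stack:
--                     node = stack.pop()
--                     if node == atom or node in visited or not is_heavy(node):
--                         continue
--                     visited.add(node)
--                     path.append(node)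
--                     stack.extend(reversed(adjlist[node]))
--                 paths.append(path)
--         return paths
--
--     return {
--         atom: paths_from(atom, neighbors)
--         for atom, neighbors in adjlist.items()
--         if not (heavy_atoms_only and not is_heavy(atom))
--     }
-- ===== Notes on version B (the rewrite author's own statement) =====
-- stated objective: alternative
-- what changed: The recursive traverse_path is replaced by an explicit-stack iterative DFS (neighbors pushed in reversed order, visited re-checked at pop time), and the result dict is built by a comprehension over a per-atom helper instead of in-place dict mutation.
import Mathlib
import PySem

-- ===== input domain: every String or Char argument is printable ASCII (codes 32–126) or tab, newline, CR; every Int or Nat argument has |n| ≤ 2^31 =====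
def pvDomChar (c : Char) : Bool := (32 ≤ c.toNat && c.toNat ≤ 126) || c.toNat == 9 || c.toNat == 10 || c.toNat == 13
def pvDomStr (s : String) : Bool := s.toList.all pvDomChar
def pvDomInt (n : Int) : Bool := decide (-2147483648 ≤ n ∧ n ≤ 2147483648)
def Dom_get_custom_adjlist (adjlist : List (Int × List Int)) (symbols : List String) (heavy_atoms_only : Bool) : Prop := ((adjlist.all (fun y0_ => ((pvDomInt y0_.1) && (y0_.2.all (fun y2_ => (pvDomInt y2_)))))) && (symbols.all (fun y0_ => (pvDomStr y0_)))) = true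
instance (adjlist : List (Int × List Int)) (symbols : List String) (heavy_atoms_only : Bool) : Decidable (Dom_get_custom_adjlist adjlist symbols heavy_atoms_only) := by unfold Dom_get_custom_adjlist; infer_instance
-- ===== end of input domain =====

-- B replaces A's recursive traverse_path with an explicit-stack iterative DFS and builds the
-- result by a comprehension-style filter+map instead of in-place dict mutation; same values.

-- shared helpers: is_heavy = (symbols[a] != "H") — the value of the `none` (IndexError) arm is
-- never reached on inputs Pre_ admits; adjlist[c] as first-match lookup (Pre_'s Nodup keys make
-- the association list an exact image of the Python dict), default [] likewise unreachable there.
def pvHeavy (symbols : List String) (a : Int) : Bool :=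
  match PySem.List.pyGet? symbols a with
  | some s => decide (s ≠ "H")
  | none => false

def pvAdjGet (adjlist : List (Int × List Int)) (c : Int) : List Int :=
  ((PySem.Dict.mk adjlist).get? c).getD []

-- ===== PORT A =====
-- traverse_path: fuel-bounded structural recursion (visited grows on every call, so the
-- recursion depth is at most the number of distinct keys; top-level fuel adjlist.length + 2
-- always suffices — the 0-fuel arm is never reached; this is proved, not assumed, below).
def pvTravA (adjlist : List (Int × List Int)) (symbols : List String) (start : Int) :
    Nat → Int → PySem.Set Int → List Int × PySem.Set Int
  | 0, c, vis => ([c], vis.add c)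
  | f + 1, c, vis =>
    (pvAdjGet adjlist c).foldl
      (fun acc n =>
        if n = start ∨ n ∈ acc.2 then acc
        else if pvHeavy symbols n then
          let r := pvTravA adjlist symbols start f n acc.2
          (acc.1 ++ r.1, r.2)
        else acc)
      ([c], vis.add c)

def get_custom_adjlist (adjlist : List (Int × List Int)) (symbols : List String) (heavy_atoms_only : Bool) : List (Int × List (List Int)) :=
  adjlist.foldl
    (fun out p =>
      if heavy_atoms_only && !pvHeavy symbols p.1 then out
      else
        out ++ [(p.1,
          (p.2.foldl
            (fun (acc : List (List Int) × PySem.Set Int) n =>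
              if pvHeavy symbols n ∧ n ∉ acc.2 then
                let r := pvTravA adjlist symbols p.1 (adjlist.length + 2) n acc.2
                (acc.1 ++ [r.1], r.2)
              else acc)
            ([], PySem.Set.empty)).1)])
    []

-- ===== PORT B =====
-- the while-loop over the explicit stack; Python keeps the stack top at the END of the list and
-- pushes reversed(adjlist[node]), we keep the top at the HEAD, so the push is adjlist[node]
-- itself. Fuel 2*(sum of neighbour-list lengths)+2 bounds the pops of any run (proved below).
def pvRunB (adjlist : List (Int × List Int)) (symbols : List String) (start : Int) :
    Nat → List Int → PySem.Set Int → List Int → List Int × PySem.Set Int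
  | 0, _, vis, path => (path, vis)
  | _ + 1, [], vis, path => (path, vis)
  | f + 1, node :: st, vis, path =>
    if node = start ∨ node ∈ vis ∨ ¬ pvHeavy symbols node then
      pvRunB adjlist symbols start f st vis path
    else
      pvRunB adjlist symbols start f (pvAdjGet adjlist node ++ st) (vis.add node) (path ++ [node])

def pvFuelB (adjlist : List (Int × List Int)) : Nat :=
  2 * (adjlist.map (fun p => p.2.length)).sum + 2

def pvPathsB (adjlist : List (Int × List Int)) (symbols : List String) (atom : Int) (neighbors : List Int) : List (List Int) :=
  (neighbors.foldl
    (fun (acc : List (List Int) × PySem.Set Int) n =>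
      if pvHeavy symbols n ∧ n ∉ acc.2 then
        let r := pvRunB adjlist symbols atom (pvFuelB adjlist) (pvAdjGet adjlist n) (PySem.Set.add acc.2 n) [n]
        (acc.1 ++ [r.1], r.2)
      else acc)
    ([], PySem.Set.empty)).1

def get_custom_adjlist_alt (adjlist : List (Int × List Int)) (symbols : List String) (heavy_atoms_only : Bool) : List (Int × List (List Int)) :=
  (adjlist.filter (fun p => !(heavy_atoms_only && !pvHeavy symbols p.1))).map
    (fun p => (p.1, pvPathsB adjlist symbols p.1 p.2))

-- ===== PRECONDITION & SPEC =====
def pvInRange (symbols : List String) (n : Int) : Bool := (PySem.List.pyGet? symbols n).isSome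

-- Pre_ excludes (a) inputs on which Python A raises: an out-of-range atom index reached by
-- symbols[atom] (IndexError), or a heavy neighbour of an active atom that is missing from the
-- adjacency dict (KeyError) — "active" = a key whose neighbour row A scans, i.e. every key when
-- heavy_atoms_only is false and every heavy key otherwise; and (b) association lists with
-- duplicate keys, a defensible corner where the Python dict argument is already the merged
-- (last-wins) dict, so the assoc-list representation is ambiguous (both programs, fed the
-- merged dict, return the same value there).
def Pre_get_custom_adjlist (adjlist : List (Int × List Int)) (symbols : List String) (heavy_atoms_only : Bool) : Prop :=
  (adjlist.map Prod.fst).Nodup ∧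
  (heavy_atoms_only = true → ∀ p ∈ adjlist, pvInRange symbols p.1 = true) ∧
  (∀ p ∈ adjlist, (heavy_atoms_only = false ∨ pvHeavy symbols p.1 = true) →
    ∀ n ∈ p.2, pvInRange symbols n = true ∧
      (pvHeavy symbols n = true → n ∈ adjlist.map Prod.fst))

instance (adjlist : List (Int × List Int)) (symbols : List String) (heavy_atoms_only : Bool) : Decidable (Pre_get_custom_adjlist adjlist symbols heavy_atoms_only) := by unfold Pre_get_custom_adjlist; infer_instance

def pvWitness_get_custom_adjlist : (List (Int × List Int)) × List String × Bool :=
  ([(0, [1]), (1, [0])], ["C", "C"], true)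

def Spec_get_custom_adjlist (adjlist : List (Int × List Int)) (symbols : List String) (heavy_atoms_only : Bool) (out : List (Int × List (List Int))) : Prop := out = get_custom_adjlist_alt adjlist symbols heavy_atoms_only
instance (adjlist : List (Int × List Int)) (symbols : List String) (heavy_atoms_only : Bool) (out : List (Int × List (List Int))) : Decidable (Spec_get_custom_adjlist adjlist symbols heavy_atoms_only out) := by unfold Spec_get_custom_adjlist; infer_instance

-- ===== CLAIM (what is proved, stated in full; the proofs are below) =====
def Claim_equal_get_custom_adjlist : Prop := ∀ (adjlist : List (Int × List Int)) (symbols : List String) (heavy_atoms_only : Bool), Dom_get_custom_adjlist adjlist symbols heavy_atoms_only → Pre_get_custom_adjlist adjlist symbols heavy_atoms_only → Spec_get_custom_adjlist adjlist symbols heavy_atoms_only (get_custom_adjlist adjlist symbols heavy_atoms_only)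

-- ===== LEMMAS AND PROOFS =====
-- Proof plan: both DFSs are normalised to canonical-fuel forms (fuel-monotonicity lemmas
-- travA_fuel / runB_fuel over the measures pvKA = #unvisited keys and pvPsi = stack length +
-- total out-degree of unvisited keys), and the simulation lemma pv_sim shows one stack visit
-- equals one recursive traverse_path call by strong induction on pvKA.

def pvKeys (adj : List (Int × List Int)) : List Int := PySem.List.dedup (adj.map Prod.fst)
def pvDeg (adj : List (Int × List Int)) (k : Int) : Nat := (pvAdjGet adj k).length
def pvKA (adj : List (Int × List Int)) (vis : PySem.Set Int) : Nat :=
  (pvKeys adj).countP (fun k => decide (k ∉ vis))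
def pvPsi (adj : List (Int × List Int)) (st : List Int) (vis : PySem.Set Int) : Nat :=
  st.length + (((pvKeys adj).filter (fun k => decide (k ∉ vis))).map (pvDeg adj)).sum

theorem pvAdjGet_cons (k : Int) (v : List Int) (rest : List (Int × List Int)) (x : Int) :
    pvAdjGet ((k, v) :: rest) x = if k = x then v else pvAdjGet rest x := by
  simp only [pvAdjGet, PySem.Dict.get?_mk_cons]
  by_cases h : k = x
  · simp [h]
  · simp [show (k == x) = false from by simpa using h, h]

theorem pvAdjGet_nil (x : Int) : pvAdjGet [] x = [] := rfl

theorem pvAdjGet_of_not_mem (adj : List (Int × List Int)) (x : Int)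
    (h : x ∉ adj.map Prod.fst) : pvAdjGet adj x = [] := by
  induction adj with
  | nil => rfl
  | cons p rest ih =>
    obtain ⟨k, v⟩ := p
    simp only [List.map_cons, List.mem_cons] at h
    simp only [not_or] at h
    rw [pvAdjGet_cons, if_neg (by exact fun hkx => h.1 hkx.symm)]
    exact ih h.2

theorem mem_pvKeys (adj : List (Int × List Int)) (k : Int) :
    k ∈ pvKeys adj ↔ k ∈ adj.map Prod.fst := PySem.List.mem_dedup _ _

theorem nodup_pvKeys (adj : List (Int × List Int)) : (pvKeys adj).Nodup :=
  PySem.List.nodup_dedup _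

-- countP strict monotonicity with a flipping witness
theorem pv_countP_lt {p q : Int → Bool} (l : List Int)
    (hpq : ∀ a ∈ l, p a = true → q a = true) (k : Int) (hk : k ∈ l)
    (h1 : p k = false) (h2 : q k = true) : l.countP p < l.countP q := by
  induction l with
  | nil => simp at hk
  | cons a l ih =>
    rcases List.mem_cons.mp hk with rfl | hkl
    · rw [List.countP_cons, List.countP_cons, h1, h2]
      simp only [if_true, Bool.false_eq_true, if_false]
      have := List.countP_mono_left (p := p) (q := q) (fun a ha => hpq a (List.mem_cons_of_mem _ ha))
      omega
    · have hmono := ih (fun a ha => hpq a (List.mem_cons_of_mem _ ha)) hkl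
      rw [List.countP_cons, List.countP_cons]
      by_cases hpa : p a = true
      · rw [hpa, hpq a (List.mem_cons_self) hpa]; omega
      · rw [Bool.not_eq_true] at hpa
        rw [hpa]
        cases hqa : q a <;> simp <;> omega

theorem pvKA_le_of_subset (adj : List (Int × List Int)) {s t : PySem.Set Int}
    (h : ∀ x, x ∈ s → x ∈ t) : pvKA adj t ≤ pvKA adj s := by
  exact List.countP_mono_left (fun a _ hpa => by
    simp only [decide_eq_true_eq] at *
    exact fun hs => hpa (h a hs))

theorem pvKA_lt (adj : List (Int × List Int)) {s t : PySem.Set Int} (k : Int)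
    (hkey : k ∈ pvKeys adj) (hks : k ∉ s) (hkt : k ∈ t) (hst : ∀ x, x ∈ s → x ∈ t) :
    pvKA adj t < pvKA adj s := by
  apply pv_countP_lt _ (fun a _ hpa => by
      simp only [decide_eq_true_eq] at *
      exact fun hs => hpa (hst a hs)) k hkey
  · simp [hkt]
  · simp [hks]
def pvStepA (adj : List (Int × List Int)) (sym : List String) (start : Int) (f : Nat)
    (acc : List Int × PySem.Set Int) (n : Int) : List Int × PySem.Set Int :=
  if n = start ∨ n ∈ acc.2 then acc
  else if pvHeavy sym n then
    let r := pvTravA adj sym start f n acc.2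
    (acc.1 ++ r.1, r.2)
  else acc

theorem pvTravA_succ (adj : List (Int × List Int)) (sym : List String) (start : Int) (f : Nat)
    (c : Int) (vis : PySem.Set Int) :
    pvTravA adj sym start (f + 1) c vis
      = (pvAdjGet adj c).foldl (pvStepA adj sym start f) ([c], PySem.Set.add vis c) := rfl

theorem travA_nonkey (adj : List (Int × List Int)) (sym : List String) (start : Int)
    (f : Nat) (c : Int) (vis : PySem.Set Int) (h : c ∉ adj.map Prod.fst) :
    pvTravA adj sym start f c vis = ([c], PySem.Set.add vis c) := by
  cases f with
  | zero => rfl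
  | succ f => rw [pvTravA_succ, pvAdjGet_of_not_mem adj c h]; rfl

theorem travA_vis (adj : List (Int × List Int)) (sym : List String) (start : Int) :
    ∀ (f : Nat) (c : Int) (vis : PySem.Set Int) (x : Int),
      x ∈ PySem.Set.add vis c → x ∈ (pvTravA adj sym start f c vis).2 := by
  intro f
  induction f with
  | zero => intro c vis x hx; exact hx
  | succ f ih =>
    have hstep : ∀ (acc : List Int × PySem.Set Int) (n x : Int),
        x ∈ acc.2 → x ∈ (pvStepA adj sym start f acc n).2 := by
      intro acc n x hx
      unfold pvStepA
      split_ifs with h1 h2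
      · exact hx
      · exact ih n acc.2 x ((PySem.Set.mem_add acc.2 n x).2 (Or.inl hx))
      · exact hx
    have F : ∀ (L : List Int) (acc : List Int × PySem.Set Int) (x : Int),
        x ∈ acc.2 → x ∈ ((L.foldl (pvStepA adj sym start f) acc)).2 := by
      intro L
      induction L with
      | nil => exact fun acc x h => h
      | cons n L ihL =>
        intro acc x h
        simp only [List.foldl_cons]
        exact ihL _ _ (hstep acc n x h)
    intro c vis x hx
    rw [pvTravA_succ]
    exact F _ _ _ hx

theorem travA_fuel (adj : List (Int × List Int)) (sym : List String) (start : Int) :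
    ∀ (m : Nat) (vis : PySem.Set Int) (c : Int), c ∉ vis →
      pvKA adj (PySem.Set.add vis c) ≤ m →
      ∀ f₁ f₂ : Nat, m < f₁ → m < f₂ →
        pvTravA adj sym start f₁ c vis = pvTravA adj sym start f₂ c vis := by
  intro m
  induction m using Nat.strong_induction_on with
  | _ m ih =>
  intro vis c hc hb f₁ f₂ h1 h2
  obtain ⟨a, rfl⟩ : ∃ a, f₁ = a + 1 := ⟨f₁ - 1, by omega⟩
  obtain ⟨b, rfl⟩ : ∃ b, f₂ = b + 1 := ⟨f₂ - 1, by omega⟩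
  rw [pvTravA_succ, pvTravA_succ]
  have F : ∀ (L : List Int) (acc : List Int × PySem.Set Int),
      (∀ x, x ∈ PySem.Set.add vis c → x ∈ acc.2) →
      L.foldl (pvStepA adj sym start a) acc = L.foldl (pvStepA adj sym start b) acc := by
    intro L
    induction L with
    | nil => intro acc _; rfl
    | cons n L ihL =>
      intro acc hinv
      simp only [List.foldl_cons]
      have hstep : pvStepA adj sym start a acc n = pvStepA adj sym start b acc n := by
        unfold pvStepA
        split_ifs with hskip hheavy
        · rfl
        · have hn : n ∉ acc.2 := fun h => hskip (Or.inr h)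
          by_cases hkey : n ∈ adj.map Prod.fst
          · have hsub : ∀ x, x ∈ PySem.Set.add vis c → x ∈ PySem.Set.add acc.2 n :=
              fun x hx => (PySem.Set.mem_add acc.2 n x).2 (Or.inl (hinv x hx))
            have hlt : pvKA adj (PySem.Set.add acc.2 n) < pvKA adj (PySem.Set.add vis c) := by
              apply pvKA_lt adj n ((mem_pvKeys adj n).2 hkey)
              · exact fun h => hn (hinv n h)
              · exact (PySem.Set.mem_add acc.2 n n).2 (Or.inr rfl)
              · exact hsub
            have := ih (pvKA adj (PySem.Set.add acc.2 n)) (by omega) acc.2 n hn (le_refl _)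
                a b (by omega) (by omega)
            rw [this]
          · rw [travA_nonkey adj sym start a n acc.2 hkey,
                travA_nonkey adj sym start b n acc.2 hkey]
        · rfl
      rw [hstep]
      apply ihL
      intro x hx
      have : x ∈ acc.2 := hinv x hx
      unfold pvStepA
      split_ifs with h1' h2'
      · exact this
      · exact travA_vis adj sym start b n acc.2 x ((PySem.Set.mem_add acc.2 n x).2 (Or.inl this))
      · exact this
  exact F _ _ (fun x hx => hx)

theorem runB_nil (adj : List (Int × List Int)) (sym : List String) (start : Int)
    (g : Nat) (vis : PySem.Set Int) (path : List Int) :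
    pvRunB adj sym start g [] vis path = (path, vis) := by
  cases g <;> rfl

theorem pvPsi_cons (adj : List (Int × List Int)) (node : Int) (st : List Int)
    (vis : PySem.Set Int) : pvPsi adj (node :: st) vis = pvPsi adj st vis + 1 := by
  simp only [pvPsi, List.length_cons]
  omega

theorem pv_filter_vis_add_nonkey (adj : List (Int × List Int)) (vis : PySem.Set Int)
    (node : Int) (hkey : node ∉ adj.map Prod.fst) :
    (pvKeys adj).filter (fun k => decide (k ∉ PySem.Set.add vis node))
      = (pvKeys adj).filter (fun k => decide (k ∉ vis)) := by
  apply List.filter_congr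
  intro k hk
  have hne : k ≠ node := by rintro rfl; exact hkey ((mem_pvKeys adj k).1 hk)
  simp only [decide_eq_decide, PySem.Set.mem_add]
  tauto

theorem pv_sum_deg_split (adj : List (Int × List Int)) (vis : PySem.Set Int) (node : Int)
    (hkey : node ∈ pvKeys adj) (hv : node ∉ vis) :
    (((pvKeys adj).filter (fun k => decide (k ∉ vis))).map (pvDeg adj)).sum
      = pvDeg adj node
        + (((pvKeys adj).filter (fun k => decide (k ∉ PySem.Set.add vis node))).map (pvDeg adj)).sum := by
  have hnd := nodup_pvKeys adj
  revert hkey hnd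
  generalize pvKeys adj = l
  intro hkey hnd
  induction l with
  | nil => simp at hkey
  | cons a l ihl =>
    have hnd' : a ∉ l ∧ l.Nodup := by
      rw [List.nodup_cons] at hnd; exact hnd
    rw [List.filter_cons, List.filter_cons]
    by_cases ha : a = node
    · subst ha
      have ht : l.filter (fun k => decide (k ∉ PySem.Set.add vis a))
          = l.filter (fun k => decide (k ∉ vis)) := by
        apply List.filter_congr
        intro k hk
        have hne : k ≠ a := fun h => hnd'.1 (h ▸ hk)
        simp only [decide_eq_decide, PySem.Set.mem_add]
        tauto
      have h1 : decide (a ∉ vis) = true := decide_eq_true hv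
      have h2 : decide (a ∉ PySem.Set.add vis a) = false :=
        decide_eq_false (not_not_intro ((PySem.Set.mem_add vis a a).2 (Or.inr rfl)))
      rw [h1, h2, ht]
      simp
    · have hkl : node ∈ l := by
        rcases List.mem_cons.mp hkey with h | h
        · exact absurd h.symm ha
        · exact h
      have hadd : (a ∈ PySem.Set.add vis node) ↔ (a ∈ vis) := by
        rw [PySem.Set.mem_add]
        exact ⟨fun h => h.elim id (fun h' => absurd h' ha), Or.inl⟩
      have ih := ihl hkl hnd'.2
      by_cases hav : a ∈ vis
      · have h1 : decide (a ∉ vis) = false := decide_eq_false (not_not_intro hav)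
        have h2 : decide (a ∉ PySem.Set.add vis node) = false :=
          decide_eq_false (not_not_intro (hadd.2 hav))
        rw [h1, h2, if_neg (by simp), if_neg (by simp)]
        exact ih
      · have h1 : decide (a ∉ vis) = true := decide_eq_true hav
        have h2 : decide (a ∉ PySem.Set.add vis node) = true :=
          decide_eq_true (fun h => hav (hadd.1 h))
        rw [h1, h2, if_pos rfl, if_pos rfl]
        simp only [List.map_cons, List.sum_cons, ih]
        omega

theorem pvPsi_visit (adj : List (Int × List Int)) (node : Int) (st : List Int)
    (vis : PySem.Set Int) (hv : node ∉ vis) :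
    pvPsi adj (pvAdjGet adj node ++ st) (PySem.Set.add vis node) + 1
      = pvPsi adj (node :: st) vis := by
  by_cases hkey : node ∈ adj.map Prod.fst
  · simp only [pvPsi, List.length_append, List.length_cons]
    rw [pv_sum_deg_split adj vis node ((mem_pvKeys adj node).2 hkey) hv]
    simp only [pvDeg]
    omega
  · rw [pvAdjGet_of_not_mem adj node hkey]
    simp only [pvPsi, List.nil_append, List.length_cons]
    rw [pv_filter_vis_add_nonkey adj vis node hkey]
    omega

theorem runB_fuel (adj : List (Int × List Int)) (sym : List String) (start : Int) :
    ∀ (m : Nat) (st : List Int) (vis : PySem.Set Int) (path : List Int) (g₁ g₂ : Nat),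
      pvPsi adj st vis ≤ m → m ≤ g₁ → m ≤ g₂ →
      pvRunB adj sym start g₁ st vis path = pvRunB adj sym start g₂ st vis path := by
  intro m
  induction m with
  | zero =>
    intro st vis path g₁ g₂ hb _ _
    cases st with
    | nil => rw [runB_nil, runB_nil]
    | cons node st => rw [pvPsi_cons] at hb; omega
  | succ m ih =>
    intro st vis path g₁ g₂ hb h1 h2
    cases st with
    | nil => rw [runB_nil, runB_nil]
    | cons node st =>
      obtain ⟨a, rfl⟩ : ∃ a, g₁ = a + 1 := ⟨g₁ - 1, by omega⟩
      obtain ⟨b, rfl⟩ : ∃ b, g₂ = b + 1 := ⟨g₂ - 1, by omega⟩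
      rw [pvPsi_cons] at hb
      show (if node = start ∨ node ∈ vis ∨ ¬ pvHeavy sym node then
          pvRunB adj sym start a st vis path
        else pvRunB adj sym start a (pvAdjGet adj node ++ st) (vis.add node) (path ++ [node]))
        = (if node = start ∨ node ∈ vis ∨ ¬ pvHeavy sym node then
          pvRunB adj sym start b st vis path
        else pvRunB adj sym start b (pvAdjGet adj node ++ st) (vis.add node) (path ++ [node]))
      split_ifs with h
      · exact ih st vis path a b (by omega) (by omega) (by omega)
      · have hv : node ∉ vis := fun hm => h (Or.inr (Or.inl hm))
        have hpsi := pvPsi_visit adj node st vis hv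
        rw [pvPsi_cons] at hpsi
        exact ih _ _ _ a b (by omega) (by omega) (by omega)

def pvTC (adj : List (Int × List Int)) (sym : List String) (start : Int)
    (c : Int) (vis : PySem.Set Int) : List Int × PySem.Set Int :=
  pvTravA adj sym start (pvKA adj (PySem.Set.add vis c) + 1) c vis

def pvRC (adj : List (Int × List Int)) (sym : List String) (start : Int)
    (st : List Int) (vis : PySem.Set Int) (path : List Int) : List Int × PySem.Set Int :=
  pvRunB adj sym start (pvPsi adj st vis + 1) st vis path

theorem pvTC_eq (adj : List (Int × List Int)) (sym : List String) (start : Int)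
    (f : Nat) (c : Int) (vis : PySem.Set Int) (hc : c ∉ vis)
    (hf : pvKA adj (PySem.Set.add vis c) < f) :
    pvTravA adj sym start f c vis = pvTC adj sym start c vis :=
  travA_fuel adj sym start (pvKA adj (PySem.Set.add vis c)) vis c hc (le_refl _) f _ hf (by omega)

theorem pvRC_eq (adj : List (Int × List Int)) (sym : List String) (start : Int)
    (g : Nat) (st : List Int) (vis : PySem.Set Int) (path : List Int)
    (hg : pvPsi adj st vis ≤ g) :
    pvRunB adj sym start g st vis path = pvRC adj sym start st vis path :=
  runB_fuel adj sym start (pvPsi adj st vis) st vis path g _ (le_refl _) hg (by omega)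

theorem pvRC_nil (adj : List (Int × List Int)) (sym : List String) (start : Int)
    (vis : PySem.Set Int) (path : List Int) :
    pvRC adj sym start [] vis path = (path, vis) := runB_nil _ _ _ _ _ _

theorem pvRC_skip (adj : List (Int × List Int)) (sym : List String) (start : Int)
    (node : Int) (st : List Int) (vis : PySem.Set Int) (path : List Int)
    (h : node = start ∨ node ∈ vis ∨ ¬ pvHeavy sym node) :
    pvRC adj sym start (node :: st) vis path = pvRC adj sym start st vis path := by
  unfold pvRC
  rw [pvPsi_cons]
  show (if node = start ∨ node ∈ vis ∨ ¬ pvHeavy sym node then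
      pvRunB adj sym start (pvPsi adj st vis + 1) st vis path
    else pvRunB adj sym start (pvPsi adj st vis + 1) (pvAdjGet adj node ++ st) (vis.add node) (path ++ [node]))
    = pvRunB adj sym start (pvPsi adj st vis + 1) st vis path
  rw [if_pos h]

theorem pvRC_visit (adj : List (Int × List Int)) (sym : List String) (start : Int)
    (node : Int) (st : List Int) (vis : PySem.Set Int) (path : List Int)
    (hns : node ≠ start) (hnv : node ∉ vis) (hh : pvHeavy sym node = true) :
    pvRC adj sym start (node :: st) vis path
      = pvRC adj sym start (pvAdjGet adj node ++ st) (PySem.Set.add vis node) (path ++ [node]) := by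
  unfold pvRC
  rw [pvPsi_cons]
  show (if node = start ∨ node ∈ vis ∨ ¬ pvHeavy sym node then
      pvRunB adj sym start (pvPsi adj st vis + 1) st vis path
    else pvRunB adj sym start (pvPsi adj st vis + 1) (pvAdjGet adj node ++ st) (vis.add node) (path ++ [node]))
    = _
  rw [if_neg (by simp [hns, hnv, hh])]
  apply runB_fuel adj sym start (pvPsi adj st vis + 1)
  · have := pvPsi_visit adj node st vis hnv
    rw [pvPsi_cons] at this
    omega
  · omega
  · have := pvPsi_visit adj node st vis hnv
    rw [pvPsi_cons] at this
    omega

def pvStepTC (adj : List (Int × List Int)) (sym : List String) (start : Int)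
    (acc : List Int × PySem.Set Int) (n : Int) : List Int × PySem.Set Int :=
  if n = start ∨ n ∈ acc.2 then acc
  else if pvHeavy sym n then
    let r := pvTC adj sym start n acc.2
    (acc.1 ++ r.1, r.2)
  else acc

def pvFoldTC (adj : List (Int × List Int)) (sym : List String) (start : Int)
    (L : List Int) (acc : List Int × PySem.Set Int) : List Int × PySem.Set Int :=
  L.foldl (pvStepTC adj sym start) acc

theorem pvTC_nonkey (adj : List (Int × List Int)) (sym : List String) (start : Int)
    (c : Int) (vis : PySem.Set Int) (h : c ∉ adj.map Prod.fst) :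
    pvTC adj sym start c vis = ([c], PySem.Set.add vis c) :=
  travA_nonkey adj sym start _ c vis h

theorem pvTC_vis (adj : List (Int × List Int)) (sym : List String) (start : Int)
    (c : Int) (vis : PySem.Set Int) (x : Int) (hx : x ∈ PySem.Set.add vis c) :
    x ∈ (pvTC adj sym start c vis).2 :=
  travA_vis adj sym start _ c vis x hx

theorem pvTC_fold (adj : List (Int × List Int)) (sym : List String) (start : Int)
    (c : Int) (vis : PySem.Set Int) (_hc : c ∉ vis) :
    pvTC adj sym start c vis
      = pvFoldTC adj sym start (pvAdjGet adj c) ([c], PySem.Set.add vis c) := by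
  unfold pvTC
  rw [pvTravA_succ]
  have F : ∀ (L : List Int) (acc : List Int × PySem.Set Int),
      (∀ x, x ∈ PySem.Set.add vis c → x ∈ acc.2) →
      L.foldl (pvStepA adj sym start (pvKA adj (PySem.Set.add vis c))) acc
        = pvFoldTC adj sym start L acc := by
    intro L
    induction L with
    | nil => intro acc _; rfl
    | cons n L ihL =>
      intro acc hinv
      unfold pvFoldTC
      simp only [List.foldl_cons]
      have hstep : pvStepA adj sym start (pvKA adj (PySem.Set.add vis c)) acc n
          = pvStepTC adj sym start acc n := by
        unfold pvStepA pvStepTC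
        split_ifs with hskip hheavy
        · rfl
        · have hn : n ∉ acc.2 := fun h => hskip (Or.inr h)
          by_cases hkey : n ∈ adj.map Prod.fst
          · have hsub : ∀ x, x ∈ PySem.Set.add vis c → x ∈ PySem.Set.add acc.2 n :=
              fun x hx => (PySem.Set.mem_add acc.2 n x).2 (Or.inl (hinv x hx))
            have hlt : pvKA adj (PySem.Set.add acc.2 n) < pvKA adj (PySem.Set.add vis c) := by
              apply pvKA_lt adj n ((mem_pvKeys adj n).2 hkey)
              · exact fun h => hn (hinv n h)
              · exact (PySem.Set.mem_add acc.2 n n).2 (Or.inr rfl)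
              · exact hsub
            rw [pvTC_eq adj sym start _ n acc.2 hn hlt]
          · rw [travA_nonkey adj sym start _ n acc.2 hkey, pvTC_nonkey adj sym start n acc.2 hkey]
        · rfl
      rw [hstep]
      have : ∀ x, x ∈ PySem.Set.add vis c → x ∈ (pvStepTC adj sym start acc n).2 := by
        intro x hx
        have hx' : x ∈ acc.2 := hinv x hx
        unfold pvStepTC
        split_ifs with h1' h2'
        · exact hx'
        · exact pvTC_vis adj sym start n acc.2 x ((PySem.Set.mem_add acc.2 n x).2 (Or.inl hx'))
        · exact hx'
      exact ihL _ this
  exact F _ _ (fun x hx => hx)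

theorem pv_sim (adj : List (Int × List Int)) (sym : List String) (start : Int) :
    ∀ (m : Nat) (vis : PySem.Set Int) (c : Int), c ∉ vis → pvKA adj vis ≤ m →
      ∀ (st path : List Int),
        pvRC adj sym start (pvAdjGet adj c ++ st) (PySem.Set.add vis c) (path ++ [c])
          = pvRC adj sym start st (pvTC adj sym start c vis).2
              (path ++ (pvTC adj sym start c vis).1) := by
  intro m
  induction m using Nat.strong_induction_on with
  | _ m ih =>
  intro vis c hc hm st path
  by_cases hkey : c ∈ adj.map Prod.fst
  · have hka : 0 < pvKA adj vis := by
      rw [pvKA, List.countP_pos_iff]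
      exact ⟨c, (mem_pvKeys adj c).2 hkey, by simpa using hc⟩
    have hlt : pvKA adj (PySem.Set.add vis c) < pvKA adj vis := by
      apply pvKA_lt adj c ((mem_pvKeys adj c).2 hkey) hc
      · exact (PySem.Set.mem_add vis c c).2 (Or.inr rfl)
      · exact fun x hx => (PySem.Set.mem_add vis c x).2 (Or.inl hx)
    rw [pvTC_fold adj sym start c vis hc]
    have J : ∀ (L : List Int) (V : PySem.Set Int) (p st path : List Int),
        (∀ x, x ∈ PySem.Set.add vis c → x ∈ V) → pvKA adj V ≤ m - 1 →
        pvRC adj sym start (L ++ st) V (path ++ p)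
          = pvRC adj sym start st (pvFoldTC adj sym start L (p, V)).2
              (path ++ (pvFoldTC adj sym start L (p, V)).1) := by
      intro L
      induction L with
      | nil => intro V p st path _ _; rfl
      | cons n L ihL =>
        intro V p st path hV hKA
        rw [List.cons_append]
        by_cases h1 : n = start ∨ n ∈ V
        · have hfold : pvFoldTC adj sym start (n :: L) (p, V) = pvFoldTC adj sym start L (p, V) := by
            unfold pvFoldTC
            simp only [List.foldl_cons]
            rw [show pvStepTC adj sym start (p, V) n = (p, V) from by
              unfold pvStepTC; rw [if_pos h1]]
          rw [hfold, pvRC_skip adj sym start n (L ++ st) V (path ++ p)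
            (h1.elim Or.inl (fun h => Or.inr (Or.inl h)))]
          exact ihL V p st path hV hKA
        · have hn : n ∉ V := fun h => h1 (Or.inr h)
          have hns : n ≠ start := fun h => h1 (Or.inl h)
          by_cases h2 : pvHeavy sym n = true
          · rw [pvRC_visit adj sym start n (L ++ st) V (path ++ p) hns hn h2]
            have hrec := ih (pvKA adj V) (by omega) V n hn (le_refl _) (L ++ st) (path ++ p)
            rw [hrec, List.append_assoc]
            have hV' : ∀ x, x ∈ PySem.Set.add vis c → x ∈ (pvTC adj sym start n V).2 :=
              fun x hx => pvTC_vis adj sym start n V x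
                ((PySem.Set.mem_add V n x).2 (Or.inl (hV x hx)))
            have hKA' : pvKA adj (pvTC adj sym start n V).2 ≤ m - 1 :=
              le_trans (pvKA_le_of_subset adj (fun x hx =>
                pvTC_vis adj sym start n V x ((PySem.Set.mem_add V n x).2 (Or.inl hx)))) hKA
            rw [ihL (pvTC adj sym start n V).2 (p ++ (pvTC adj sym start n V).1) st path hV' hKA']
            have hfold : pvFoldTC adj sym start (n :: L) (p, V)
                = pvFoldTC adj sym start L (p ++ (pvTC adj sym start n V).1, (pvTC adj sym start n V).2) := by
              unfold pvFoldTC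
              simp only [List.foldl_cons]
              rw [show pvStepTC adj sym start (p, V) n
                  = (p ++ (pvTC adj sym start n V).1, (pvTC adj sym start n V).2) from by
                unfold pvStepTC; rw [if_neg h1, if_pos h2]]
            rw [hfold]
          · have hfold : pvFoldTC adj sym start (n :: L) (p, V) = pvFoldTC adj sym start L (p, V) := by
              unfold pvFoldTC
              simp only [List.foldl_cons]
              rw [show pvStepTC adj sym start (p, V) n = (p, V) from by
                unfold pvStepTC; rw [if_neg h1, if_neg h2]]
            rw [hfold, pvRC_skip adj sym start n (L ++ st) V (path ++ p)
              (Or.inr (Or.inr (by simpa using h2)))]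
            exact ihL V p st path hV hKA
    exact J (pvAdjGet adj c) (PySem.Set.add vis c) [c] st path (fun x hx => hx) (by omega)
  · rw [pvAdjGet_of_not_mem adj c hkey, pvTC_nonkey adj sym start c vis hkey, List.nil_append]

theorem pv_set_add_len (s : PySem.Set Int) (x : Int) :
    (PySem.Set.add s x).length ≤ s.length + 1 := by
  unfold PySem.Set.add
  split_ifs
  · omega
  · simp

theorem pv_dedup_len (xs : List Int) : (PySem.List.dedup xs).length ≤ xs.length := by
  have F : ∀ (l : List Int) (s : PySem.Set Int),
      (l.foldl PySem.Set.add s).length ≤ s.length + l.length := by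
    intro l
    induction l with
    | nil => intro s; simp
    | cons x l ihl =>
      intro s
      simp only [List.foldl_cons, List.length_cons]
      have h1 := ihl (PySem.Set.add s x)
      have h2 := pv_set_add_len s x
      omega
  have := F xs []
  rw [PySem.List.dedup_eq_ofList, PySem.Set.ofList_eq_foldl]
  simpa using this

theorem pvKA_le (adj : List (Int × List Int)) (vis : PySem.Set Int) :
    pvKA adj vis ≤ adj.length := by
  have h1 : pvKA adj vis ≤ (pvKeys adj).length := List.countP_le_length
  have h2 : (pvKeys adj).length ≤ (adj.map Prod.fst).length := pv_dedup_len _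
  simp only [List.length_map] at h2
  omega

theorem pvDeg_cons (k : Int) (v : List Int) (rest : List (Int × List Int)) (x : Int) :
    pvDeg ((k, v) :: rest) x = if k = x then v.length else pvDeg rest x := by
  unfold pvDeg
  rw [pvAdjGet_cons]
  split_ifs <;> rfl

theorem pv_deg_le (adj : List (Int × List Int)) (k : Int) :
    pvDeg adj k ≤ (adj.map (fun p => p.2.length)).sum := by
  induction adj with
  | nil => simp [pvDeg, pvAdjGet_nil]
  | cons p rest ih =>
    obtain ⟨k0, v⟩ := p
    rw [pvDeg_cons]
    simp only [List.map_cons, List.sum_cons]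
    split_ifs <;> omega

theorem pv_sumdeg_le (adj : List (Int × List Int)) :
    ∀ (l : List Int), l.Nodup →
      (l.map (pvDeg adj)).sum ≤ (adj.map (fun p => p.2.length)).sum := by
  induction adj with
  | nil =>
    intro l _
    have : ∀ x ∈ l, pvDeg ([] : List (Int × List Int)) x = 0 := by
      intro x _; rfl
    rw [List.map_congr_left this]
    simp
  | cons p rest ihadj =>
    obtain ⟨k0, v⟩ := p
    have aux : ∀ (l : List Int), l.Nodup →
        (l.map (pvDeg ((k0, v) :: rest))).sum
          ≤ v.length + ((l.filter (fun x => !decide (k0 = x))).map (pvDeg rest)).sum := by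
      intro l
      induction l with
      | nil => intro _; simp
      | cons x l ihx =>
        intro hnd
        rw [List.nodup_cons] at hnd
        simp only [List.map_cons, List.sum_cons, pvDeg_cons, List.filter_cons]
        by_cases hk : k0 = x
        · subst hk
          rw [if_pos rfl]
          have hmap : l.map (pvDeg ((k0, v) :: rest)) = l.map (pvDeg rest) := by
            apply List.map_congr_left
            intro y hy
            rw [pvDeg_cons, if_neg (fun (h : k0 = y) => hnd.1 (h.symm ▸ hy))]
          have hfil : l.filter (fun x => !decide (k0 = x)) = l := by
            apply List.filter_eq_self.2
            intro y hy
            simp only [Bool.not_eq_eq_eq_not, Bool.not_true, decide_eq_false_iff_not]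
            exact fun h => hnd.1 (h.symm ▸ hy)
          rw [hmap, show (decide (k0 = k0) : Bool) = true from by simp]
          simp only [Bool.not_true, Bool.false_eq_true, if_false, hfil]
          omega
        · rw [if_neg hk, show (decide (k0 = x) : Bool) = false from by simpa using hk]
          simp only [Bool.not_false, if_true, List.map_cons, List.sum_cons]
          have := ihx hnd.2
          omega
    intro l hnd
    have h1 := aux l hnd
    have h2 := ihadj (l.filter (fun x => !decide (k0 = x))) (List.Nodup.filter _ hnd)
    simp only [List.map_cons, List.sum_cons]
    omega

theorem pv_core (adj : List (Int × List Int)) (sym : List String) (start n : Int)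
    (vis : PySem.Set Int) (hn : n ∉ vis) :
    pvRunB adj sym start (pvFuelB adj) (pvAdjGet adj n) (PySem.Set.add vis n) [n]
      = pvTravA adj sym start (adj.length + 2) n vis := by
  have hg : pvPsi adj (pvAdjGet adj n) (PySem.Set.add vis n) ≤ pvFuelB adj := by
    have h1 : (pvAdjGet adj n).length ≤ (adj.map (fun p => p.2.length)).sum := pv_deg_le adj n
    have h2 := pv_sumdeg_le adj
      ((pvKeys adj).filter (fun k => decide (k ∉ PySem.Set.add vis n)))
      (List.Nodup.filter _ (nodup_pvKeys adj))
    unfold pvPsi pvFuelB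
    omega
  have hf : pvKA adj (PySem.Set.add vis n) < adj.length + 2 := by
    have := pvKA_le adj (PySem.Set.add vis n)
    omega
  rw [pvRC_eq adj sym start _ _ _ _ hg, pvTC_eq adj sym start _ n vis hn hf]
  have := pv_sim adj sym start (pvKA adj vis) vis n hn (le_refl _) [] []
  simp only [List.append_nil, List.nil_append] at this
  rw [this, pvRC_nil]

theorem pv_inner (adj : List (Int × List Int)) (sym : List String) (atom : Int) :
    ∀ (ns : List Int) (acc : List (List Int) × PySem.Set Int),
      ns.foldl
        (fun (acc : List (List Int) × PySem.Set Int) n =>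
          if pvHeavy sym n ∧ n ∉ acc.2 then
            (acc.1 ++ [(pvTravA adj sym atom (adj.length + 2) n acc.2).1],
              (pvTravA adj sym atom (adj.length + 2) n acc.2).2)
          else acc) acc
      = ns.foldl
        (fun (acc : List (List Int) × PySem.Set Int) n =>
          if pvHeavy sym n ∧ n ∉ acc.2 then
            (acc.1 ++ [(pvRunB adj sym atom (pvFuelB adj) (pvAdjGet adj n) (PySem.Set.add acc.2 n) [n]).1],
              (pvRunB adj sym atom (pvFuelB adj) (pvAdjGet adj n) (PySem.Set.add acc.2 n) [n]).2)
          else acc) acc := by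
  intro ns
  induction ns with
  | nil => intro _; rfl
  | cons n ns ihn =>
    intro acc
    simp only [List.foldl_cons]
    by_cases h : pvHeavy sym n ∧ n ∉ acc.2
    · rw [if_pos h, if_pos h, pv_core adj sym atom n acc.2 h.2]
      exact ihn _
    · rw [if_neg h, if_neg h]
      exact ihn _

theorem pv_outer (cond : (Int × List Int) → Bool)
    (fA fB : (Int × List Int) → Int × List (List Int)) :
    ∀ (l : List (Int × List Int)), (∀ p ∈ l, fA p = fB p) → ∀ out,
      l.foldl (fun out p => if cond p then out else out ++ [fA p]) out
        = out ++ (l.filter (fun p => !cond p)).map fB := by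
  intro l
  induction l with
  | nil => intro _ out; simp
  | cons p l ihl =>
    intro hf out
    simp only [List.foldl_cons, List.filter_cons]
    by_cases hc : cond p = true
    · rw [if_pos hc, show (!cond p) = false from by simp [hc]]
      simp only [Bool.false_eq_true, if_false]
      exact ihl (fun q hq => hf q (List.mem_cons_of_mem _ hq)) out
    · rw [if_neg hc, show (!cond p) = true from by simp [Bool.not_eq_true] at hc ⊢; exact hc]
      simp only [if_true, List.map_cons]
      rw [ihl (fun q hq => hf q (List.mem_cons_of_mem _ hq)) (out ++ [fA p]),
        hf p List.mem_cons_self, List.append_assoc]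
      rfl

-- ===== VERDICT (by name: the statement is the Claim_ definition above) =====
theorem get_custom_adjlist_spec : Claim_equal_get_custom_adjlist := by
  intro adjlist symbols heavy_atoms_only _ _
  unfold Spec_get_custom_adjlist get_custom_adjlist get_custom_adjlist_alt
  have hf : ∀ p ∈ adjlist,
      (p.1,
        (p.2.foldl
          (fun (acc : List (List Int) × PySem.Set Int) n =>
            if pvHeavy symbols n ∧ n ∉ acc.2 then
              (acc.1 ++ [(pvTravA adjlist symbols p.1 (adjlist.length + 2) n acc.2).1],
                (pvTravA adjlist symbols p.1 (adjlist.length + 2) n acc.2).2)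
            else acc)
          ([], PySem.Set.empty)).1)
      = (p.1, pvPathsB adjlist symbols p.1 p.2) := by
    intro p _
    unfold pvPathsB
    exact congrArg (fun z => (p.1, z.1)) (pv_inner adjlist symbols p.1 p.2 ([], PySem.Set.empty))
  exact (pv_outer (fun p => heavy_atoms_only && !pvHeavy symbols p.1)
      (fun p => (p.1,
        (p.2.foldl
          (fun (acc : List (List Int) × PySem.Set Int) n =>
            if pvHeavy symbols n ∧ n ∉ acc.2 then
              (acc.1 ++ [(pvTravA adjlist symbols p.1 (adjlist.length + 2) n acc.2).1],
                (pvTravA adjlist symbols p.1 (adjlist.length + 2) n acc.2).2)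
            else acc)
          ([], PySem.Set.empty)).1))
      (fun p => (p.1, pvPathsB adjlist symbols p.1 p.2)) adjlist hf []).trans
    (by rw [List.nil_append])
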